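-- pv_equiv track=rewrite | github.com/jianhu-chen/Online-Judge | basic/dp/cards_in_line.py | solution_memory_search
-- ===== SOURCE A (Python) =====
-- def solution_memory_search(arr):
--     if not arr:
--         return 0
--
--     def memory_search_first_select(arr, start, end, dp1, dp2):
--         if dp1[start][end] != -1:
--             return dp1[start][end]
--
--         if start == end:
--             ans = arr[start]
--         else:
--             ans = max(
--                 memory_search_second_select(arr, start + 1, end, dp1, dp2) + arr[start],
--                 memory_search_second_select(arr, start, end - 1, dp1, dp2) + arr[end]
--             )
--         dp1[start][end] = ans
--         return ans
--
--     def memory_search_second_select(arr, start, end, dp1, dp2):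
--         if dp2[start][end] != -1:
--             return dp2[start][end]
--
--         if start == end:
--             ans = 0
--         else:
--             ans = min(
--                 memory_search_first_select(arr, start + 1, end, dp1, dp2),
--                 memory_search_first_select(arr, start, end - 1, dp1, dp2)
--             )
--         dp2[start][end] = ans
--         return ans
--
--     # row (rest) range: [0, len(arr) - 1], col(start) range: [0, len(arr) - 1]
--     dp1 = [[-1 for _ in range(len(arr))] for _ in range(len(arr))]
--     dp2 = [[-1 for _ in range(len(arr))] for _ in range(len(arr))]
--     first_select = memory_search_first_select(arr, 0, len(arr) - 1, dp1, dp2)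
--     second_secect = memory_search_second_select(arr, 0, len(arr) - 1, dp1, dp2)
--     return max(first_select, second_secect)
-- ===== SOURCE B (Python) =====
-- def solution_memory_search(arr):
--     # Space-optimized bottom-up DP over interval lengths: keep only one row per table.
--     if not arr:
--         return 0
--     row1 = list(arr)        # row1[s] = first-picker value of interval [s, s+d]  (d = 0)
--     row2 = [0] * len(arr)   # row2[s] = second-picker value of the same interval
--     tail = arr              # tail = arr[d:]
--     while len(row1) > 1:
--         tail = tail[1:]
--         new2 = [min(y, x) for x, y in zip(row1, row1[1:])]
--         new1 = [max(y2 + x0, x2 + xe) for x0, xe, x2, y2 in zip(arr, tail, row2, row2[1:])]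
--         row1, row2 = new1, new2
--     return max(row1[0], row2[0])
-- ===== Notes on version B (the rewrite author's own statement) =====
-- stated objective: faster
-- what changed: Replaced A's memoized top-down mutual recursion over two n x n tables by a bottom-up DP over interval lengths that keeps only one row per table, built by zipping the previous rows (O(n) extra space instead of O(n^2), no recursion).
import Mathlib
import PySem

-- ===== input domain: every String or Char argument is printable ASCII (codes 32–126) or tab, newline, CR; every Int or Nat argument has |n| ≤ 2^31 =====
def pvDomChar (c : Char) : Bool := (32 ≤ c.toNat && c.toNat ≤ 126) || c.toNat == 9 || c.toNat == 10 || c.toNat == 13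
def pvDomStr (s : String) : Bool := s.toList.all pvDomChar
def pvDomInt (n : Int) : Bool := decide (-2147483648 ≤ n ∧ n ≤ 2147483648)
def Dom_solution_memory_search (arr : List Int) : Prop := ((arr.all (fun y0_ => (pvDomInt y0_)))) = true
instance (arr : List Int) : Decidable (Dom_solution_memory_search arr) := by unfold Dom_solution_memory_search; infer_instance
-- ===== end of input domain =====

-- B replaces A's memoized mutual recursion over two n×n tables by a bottom-up DP over
-- interval lengths that keeps only one row per table (O(n) space); equal return values.

-- ===== PORT A =====
-- dp tables are nested lists; reads/writes are always in range in A, defaults are inert.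
def pvGet2 (t : List (List Int)) (i j : Nat) : Int := (t.getD i []).getD j (-1)

def pvSet2 (t : List (List Int)) (i j : Nat) (v : Int) : List (List Int) :=
  t.set i ((t.getD i []).set j v)

mutual
-- fuel only makes the recursion structural; it never runs out on A's call pattern.
def pvFirst (arr : List Int) : Nat → Nat → Nat → List (List Int) × List (List Int) →
    Int × (List (List Int) × List (List Int))
  | 0, _, _, st => (0, st)
  | fuel+1, s, e, st =>
    let c := pvGet2 st.1 s e
    if c ≠ -1 then (c, st)
    else
      let r :=
        if s = e then (arr.getD s 0, st)
        else
          let p := pvSecond arr fuel (s+1) e st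
          let q := pvSecond arr fuel s (e-1) p.2
          (max (p.1 + arr.getD s 0) (q.1 + arr.getD e 0), q.2)
      (r.1, (pvSet2 r.2.1 s e r.1, r.2.2))

def pvSecond (arr : List Int) : Nat → Nat → Nat → List (List Int) × List (List Int) →
    Int × (List (List Int) × List (List Int))
  | 0, _, _, st => (0, st)
  | fuel+1, s, e, st =>
    let c := pvGet2 st.2 s e
    if c ≠ -1 then (c, st)
    else
      let r :=
        if s = e then ((0 : Int), st)
        else
          let p := pvFirst arr fuel (s+1) e st
          let q := pvFirst arr fuel s (e-1) p.2
          (min p.1 q.1, q.2)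
      (r.1, (r.2.1, pvSet2 r.2.2 s e r.1))
end

def solution_memory_search (arr : List Int) : Int :=
  if arr = [] then 0
  else
    let n := arr.length
    let dp1 := List.replicate n (List.replicate n (-1 : Int))
    let dp2 := List.replicate n (List.replicate n (-1 : Int))
    let f := pvFirst arr n 0 (n-1) (dp1, dp2)
    let sc := pvSecond arr n 0 (n-1) f.2
    max f.1 sc.1

-- ===== PORT B =====
-- fuel = number of remaining iterations bound; the loop exits on its own when one row is left.
def pvLoop (arr : List Int) : Nat → List Int → List Int → List Int → Int × Int
  | 0, row1, row2, _ => (row1.getD 0 0, row2.getD 0 0)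
  | fuel+1, row1, row2, tail =>
    if row1.length ≤ 1 then (row1.getD 0 0, row2.getD 0 0)
    else
      let tail' := tail.drop 1
      let new2 := List.zipWith (fun x y => min y x) row1 (row1.drop 1)
      let new1 := List.zipWith (fun (p q : Int × Int) => max (q.2 + p.1) (q.1 + p.2))
                    (arr.zip tail') (row2.zip (row2.drop 1))
      pvLoop arr fuel new1 new2 tail'

def solution_memory_search_alt (arr : List Int) : Int :=
  if arr = [] then 0
  else
    let p := pvLoop arr arr.length arr (List.replicate arr.length 0) arr
    max p.1 p.2

-- ===== PRECONDITION & SPEC =====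
def Spec_solution_memory_search (arr : List Int) (out : Int) : Prop := out = solution_memory_search_alt arr
instance (arr : List Int) (out : Int) : Decidable (Spec_solution_memory_search arr out) := by unfold Spec_solution_memory_search; infer_instance

-- ===== CLAIM (what is proved, stated in full; the proofs are below) =====
def Claim_equal_solution_memory_search : Prop := ∀ (arr : List Int), Dom_solution_memory_search arr → Spec_solution_memory_search arr (solution_memory_search arr)

-- ===== LEMMAS AND PROOFS =====

-- pure specification: g1/g2 arr s d = value for the first/second picker on arr[s..s+d]
mutual
def g1 (arr : List Int) (s : Nat) : Nat → Int
  | 0 => arr.getD s 0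
  | d+1 => max (g2 arr (s+1) d + arr.getD s 0) (g2 arr s d + arr.getD (s+d+1) 0)

def g2 (arr : List Int) (s : Nat) : Nat → Int
  | 0 => 0
  | d+1 => min (g1 arr (s+1) d) (g1 arr s d)
end

def Shape (n : Nat) (t : List (List Int)) : Prop :=
  t.length = n ∧ ∀ r ∈ t, r.length = n

def StInv (arr : List Int) (st : List (List Int) × List (List Int)) : Prop :=
  Shape arr.length st.1 ∧ Shape arr.length st.2 ∧
  (∀ s e : Nat, s ≤ e → e < arr.length →
    pvGet2 st.1 s e = -1 ∨ pvGet2 st.1 s e = g1 arr s (e - s)) ∧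
  (∀ s e : Nat, s ≤ e → e < arr.length →
    pvGet2 st.2 s e = -1 ∨ pvGet2 st.2 s e = g2 arr s (e - s))

lemma shape_row_len {n : Nat} {t : List (List Int)} (h : Shape n t) {i : Nat} (hi : i < n) :
    (t.getD i []).length = n := by
  obtain ⟨hl, hr⟩ := h
  have hi' : i < t.length := by omega
  rw [List.getD_eq_getElem _ _ hi']
  exact hr _ (List.getElem_mem hi')

lemma shape_set2 {n : Nat} {t : List (List Int)} (h : Shape n t) {i : Nat} (hi : i < n)
    (j : Nat) (v : Int) : Shape n (pvSet2 t i j v) := by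
  obtain ⟨hl, hr⟩ := h
  refine ⟨by simpa [pvSet2] using hl, ?_⟩
  intro r hrmem
  rcases List.mem_or_eq_of_mem_set hrmem with hm | hm
  · exact hr _ hm
  · subst hm
    rw [List.length_set]
    exact shape_row_len ⟨hl, hr⟩ hi

lemma pvGet2_set2_self {n : Nat} {t : List (List Int)} (h : Shape n t) {i j : Nat}
    (hi : i < n) (hj : j < n) (v : Int) : pvGet2 (pvSet2 t i j v) i j = v := by
  have hi' : i < t.length := h.1 ▸ hi
  have hj' : j < (t.getD i []).length := by rw [shape_row_len h hi]; exact hj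
  unfold pvGet2 pvSet2
  simp only [List.getD_eq_getElem?_getD] at hj' ⊢
  rw [List.getElem?_set_self hi', Option.getD_some, List.getElem?_set_self hj', Option.getD_some]

lemma pvGet2_set2_ne {t : List (List Int)} {i j i' j' : Nat}
    (hne : i ≠ i' ∨ j ≠ j') (v : Int) : pvGet2 (pvSet2 t i j v) i' j' = pvGet2 t i' j' := by
  unfold pvGet2 pvSet2
  simp only [List.getD_eq_getElem?_getD]
  by_cases hii : i = i'
  · subst hii
    have hne' : j ≠ j' := by tauto
    by_cases hi' : i < t.length
    · rw [List.getElem?_set_self hi', Option.getD_some, List.getElem?_set_ne hne']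
    · rw [List.set_eq_of_length_le (Nat.le_of_not_lt hi')]
  · rw [List.getElem?_set_ne hii]

lemma stinv_set1 {arr : List Int} {st : List (List Int) × List (List Int)} (h : StInv arr st)
    {s e : Nat} (hse : s ≤ e) (he : e < arr.length) :
    StInv arr (pvSet2 st.1 s e (g1 arr s (e - s)), st.2) := by
  obtain ⟨h1, h2, hI1, hI2⟩ := h
  refine ⟨shape_set2 h1 (by omega) _ _, h2, ?_, hI2⟩
  intro s' e' hse' he'
  by_cases hc : s = s' ∧ e = e'
  · obtain ⟨rfl, rfl⟩ := hc
    right; exact pvGet2_set2_self h1 (by omega) he _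
  · rw [pvGet2_set2_ne (by tauto) _]
    exact hI1 s' e' hse' he'

lemma stinv_set2 {arr : List Int} {st : List (List Int) × List (List Int)} (h : StInv arr st)
    {s e : Nat} (hse : s ≤ e) (he : e < arr.length) :
    StInv arr (st.1, pvSet2 st.2 s e (g2 arr s (e - s))) := by
  obtain ⟨h1, h2, hI1, hI2⟩ := h
  refine ⟨h1, shape_set2 h2 (by omega) _ _, hI1, ?_⟩
  intro s' e' hse' he'
  by_cases hc : s = s' ∧ e = e'
  · obtain ⟨rfl, rfl⟩ := hc
    right; exact pvGet2_set2_self h2 (by omega) he _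
  · rw [pvGet2_set2_ne (by tauto) _]
    exact hI2 s' e' hse' he'

-- step-unfolding lemmas for the mutual recursion of port A
lemma pvFirst_cached (arr : List Int) (fuel s e : Nat) (st : List (List Int) × List (List Int))
    (hc : pvGet2 st.1 s e ≠ -1) : pvFirst arr (fuel+1) s e st = (pvGet2 st.1 s e, st) := by
  simp [pvFirst, hc]

lemma pvFirst_base (arr : List Int) (fuel s : Nat) (st : List (List Int) × List (List Int))
    (hc : pvGet2 st.1 s s = -1) :
    pvFirst arr (fuel+1) s s st = (arr.getD s 0, (pvSet2 st.1 s s (arr.getD s 0), st.2)) := by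
  simp [pvFirst, hc]

lemma pvFirst_step (arr : List Int) (fuel s e : Nat) (st : List (List Int) × List (List Int))
    (hc : pvGet2 st.1 s e = -1) (hne : s ≠ e) :
    pvFirst arr (fuel+1) s e st =
      (max ((pvSecond arr fuel (s+1) e st).1 + arr.getD s 0)
           ((pvSecond arr fuel s (e-1) (pvSecond arr fuel (s+1) e st).2).1 + arr.getD e 0),
       (pvSet2 (pvSecond arr fuel s (e-1) (pvSecond arr fuel (s+1) e st).2).2.1 s e
          (max ((pvSecond arr fuel (s+1) e st).1 + arr.getD s 0)
               ((pvSecond arr fuel s (e-1) (pvSecond arr fuel (s+1) e st).2).1 + arr.getD e 0)),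
        (pvSecond arr fuel s (e-1) (pvSecond arr fuel (s+1) e st).2).2.2)) := by
  simp [pvFirst, hc, hne]

lemma pvSecond_cached (arr : List Int) (fuel s e : Nat) (st : List (List Int) × List (List Int))
    (hc : pvGet2 st.2 s e ≠ -1) : pvSecond arr (fuel+1) s e st = (pvGet2 st.2 s e, st) := by
  simp [pvSecond, hc]

lemma pvSecond_base (arr : List Int) (fuel s : Nat) (st : List (List Int) × List (List Int))
    (hc : pvGet2 st.2 s s = -1) :
    pvSecond arr (fuel+1) s s st = (0, (st.1, pvSet2 st.2 s s 0)) := by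
  simp [pvSecond, hc]

lemma pvSecond_step (arr : List Int) (fuel s e : Nat) (st : List (List Int) × List (List Int))
    (hc : pvGet2 st.2 s e = -1) (hne : s ≠ e) :
    pvSecond arr (fuel+1) s e st =
      (min (pvFirst arr fuel (s+1) e st).1 (pvFirst arr fuel s (e-1) (pvFirst arr fuel (s+1) e st).2).1,
       ((pvFirst arr fuel s (e-1) (pvFirst arr fuel (s+1) e st).2).2.1,
        pvSet2 (pvFirst arr fuel s (e-1) (pvFirst arr fuel (s+1) e st).2).2.2 s e
          (min (pvFirst arr fuel (s+1) e st).1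
               (pvFirst arr fuel s (e-1) (pvFirst arr fuel (s+1) e st).2).1))) := by
  simp [pvSecond, hc, hne]

-- main invariant lemma for port A
lemma pvAB_correct (arr : List Int) : ∀ fuel : Nat,
    (∀ s e st, StInv arr st → s ≤ e → e < arr.length → e - s < fuel →
      (pvFirst arr fuel s e st).1 = g1 arr s (e - s) ∧ StInv arr (pvFirst arr fuel s e st).2) ∧
    (∀ s e st, StInv arr st → s ≤ e → e < arr.length → e - s < fuel →
      (pvSecond arr fuel s e st).1 = g2 arr s (e - s) ∧ StInv arr (pvSecond arr fuel s e st).2) := by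
  intro fuel
  induction fuel with
  | zero => exact ⟨fun s e st _ _ _ h => absurd h (by omega), fun s e st _ _ _ h => absurd h (by omega)⟩
  | succ fuel ih =>
    obtain ⟨ihF, ihS⟩ := ih
    constructor
    · intro s e st hst hse he hfe
      by_cases hc : pvGet2 st.1 s e = -1
      · by_cases hee : s = e
        · subst hee
          rw [pvFirst_base arr fuel s st hc]
          have hgv : arr.getD s 0 = g1 arr s (s - s) := by simp [g1]
          refine ⟨hgv, ?_⟩
          have h2 := stinv_set1 hst (le_refl s) he
          rw [← hgv] at h2
          exact h2
        · have hlt : s < e := lt_of_le_of_ne hse hee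
          rw [pvFirst_step arr fuel s e st hc hee]
          obtain ⟨hp1, hp2⟩ := ihS (s+1) e st hst (by omega) he (by omega)
          obtain ⟨hq1, hq2⟩ := ihS s (e-1) _ hp2 (by omega) (by omega) (by omega)
          have hval : max ((pvSecond arr fuel (s+1) e st).1 + arr.getD s 0)
              ((pvSecond arr fuel s (e-1) (pvSecond arr fuel (s+1) e st).2).1 + arr.getD e 0)
              = g1 arr s (e - s) := by
            rw [hp1, hq1]
            have h1 : e - (s+1) = e - s - 1 := by omega
            have h2 : e - 1 - s = e - s - 1 := by omega
            have hd : e - s = (e - s - 1) + 1 := by omega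
            rw [h1, h2, hd]
            simp only [g1, Nat.add_sub_cancel]
            rw [show s + (e - s - 1) + 1 = e by omega]
          refine ⟨hval, ?_⟩
          have h3 := stinv_set1 hq2 hse he
          rw [← hval] at h3
          exact h3
      · rw [pvFirst_cached arr fuel s e st hc]
        rcases hst.2.2.1 s e hse he with h | h
        · exact absurd h hc
        · exact ⟨h, hst⟩
    · intro s e st hst hse he hfe
      by_cases hc : pvGet2 st.2 s e = -1
      · by_cases hee : s = e
        · subst hee
          rw [pvSecond_base arr fuel s st hc]
          have hgv : (0 : Int) = g2 arr s (s - s) := by simp [g2]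
          refine ⟨hgv, ?_⟩
          have h2 := stinv_set2 hst (le_refl s) he
          rw [← hgv] at h2
          exact h2
        · have hlt : s < e := lt_of_le_of_ne hse hee
          rw [pvSecond_step arr fuel s e st hc hee]
          obtain ⟨hp1, hp2⟩ := ihF (s+1) e st hst (by omega) he (by omega)
          obtain ⟨hq1, hq2⟩ := ihF s (e-1) _ hp2 (by omega) (by omega) (by omega)
          have hval : min (pvFirst arr fuel (s+1) e st).1
              (pvFirst arr fuel s (e-1) (pvFirst arr fuel (s+1) e st).2).1
              = g2 arr s (e - s) := by
            rw [hp1, hq1]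
            have h1 : e - (s+1) = e - s - 1 := by omega
            have h2 : e - 1 - s = e - s - 1 := by omega
            have hd : e - s = (e - s - 1) + 1 := by omega
            rw [h1, h2, hd]
            simp only [g2, Nat.add_sub_cancel]
          refine ⟨hval, ?_⟩
          have h3 := stinv_set2 hq2 hse he
          rw [← hval] at h3
          exact h3
      · rw [pvSecond_cached arr fuel s e st hc]
        rcases hst.2.2.2 s e hse he with h | h
        · exact absurd h hc
        · exact ⟨h, hst⟩

lemma pvInit_inv (arr : List Int) :
    StInv arr (List.replicate arr.length (List.replicate arr.length (-1 : Int)),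
               List.replicate arr.length (List.replicate arr.length (-1 : Int))) := by
  have hsh : Shape arr.length (List.replicate arr.length (List.replicate arr.length (-1 : Int))) := by
    constructor
    · simp
    · intro r hr; simp_all [List.eq_of_mem_replicate hr]
  have hget : ∀ s e : Nat, e < arr.length →
      pvGet2 (List.replicate arr.length (List.replicate arr.length (-1 : Int))) s e = -1 := by
    intro s e he
    by_cases hs : s < arr.length
    · simp [pvGet2, List.getD_eq_getElem?_getD, hs, he]
    · simp [pvGet2, List.getD_eq_getElem?_getD, hs]
  exact ⟨hsh, hsh, fun s e _ he => Or.inl (hget s e he), fun s e _ he => Or.inl (hget s e he)⟩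

lemma portA_eq_g (arr : List Int) (h : arr ≠ []) :
    solution_memory_search arr = max (g1 arr 0 (arr.length - 1)) (g2 arr 0 (arr.length - 1)) := by
  have hn : 0 < arr.length := List.length_pos_iff.mpr h
  obtain ⟨hF, hS⟩ := pvAB_correct arr arr.length
  have h1 := hF 0 (arr.length - 1) _ (pvInit_inv arr) (by omega) (by omega) (by omega)
  have h2 := hS 0 (arr.length - 1) _ h1.2 (by omega) (by omega) (by omega)
  simp only [solution_memory_search, if_neg h]
  rw [h1.1, h2.1]
  simp only [Nat.sub_zero]

-- B side
lemma pvLoop_correct (arr : List Int) : ∀ k d fuel : Nat, arr.length = d + k + 1 → k ≤ fuel →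
    pvLoop arr fuel ((List.range (k+1)).map (fun s => g1 arr s d))
      ((List.range (k+1)).map (fun s => g2 arr s d)) (arr.drop d) =
      (g1 arr 0 (arr.length - 1), g2 arr 0 (arr.length - 1)) := by
  intro k
  induction k with
  | zero =>
    intro d fuel hn _
    have hd : d = arr.length - 1 := by omega
    subst hd
    cases fuel <;> simp [pvLoop]
  | succ k ih =>
    intro d fuel hn hfuel
    cases fuel with
    | zero => exact absurd hfuel (by omega)
    | succ fuel =>
      simp only [pvLoop]
      rw [if_neg (by simp)]
      have htail : ((arr.drop d).drop 1) = arr.drop (d+1) := by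
        rw [List.drop_drop, Nat.add_comm]
      have hnew2 : List.zipWith (fun x y => min y x)
          ((List.range (k+1+1)).map (fun s => g1 arr s d))
          (((List.range (k+1+1)).map (fun s => g1 arr s d)).drop 1)
          = (List.range (k+1)).map (fun s => g2 arr s (d+1)) := by
        apply List.ext_getElem
        · simp
        · intro i hi1 hi2
          simp only [List.getElem_zipWith, List.getElem_drop, List.getElem_map,
            List.getElem_range, g2]
          rw [show 1 + i = i + 1 by omega]
      have hnew1 : List.zipWith (fun (p q : Int × Int) => max (q.2 + p.1) (q.1 + p.2))
          (arr.zip (arr.drop (d+1)))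
          ((((List.range (k+1+1)).map (fun s => g2 arr s d)).zip
            (((List.range (k+1+1)).map (fun s => g2 arr s d)).drop 1)))
          = (List.range (k+1)).map (fun s => g1 arr s (d+1)) := by
        apply List.ext_getElem
        · simp; omega
        · intro i hi1 hi2
          have hik : i < k + 1 := by simpa using hi2
          simp only [List.getElem_zipWith, List.getElem_zip, List.getElem_drop,
            List.getElem_map, List.getElem_range, g1]
          rw [List.getD_eq_getElem _ _ (by omega), List.getD_eq_getElem _ _ (by omega)]
          rw [show 1 + i = i + 1 by omega]
          rw [getElem_congr rfl (show d + 1 + i = i + d + 1 by omega) (by omega)]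
      rw [htail, hnew2, hnew1]
      exact ih (d+1) fuel (by omega) (by omega)

lemma portB_eq_g (arr : List Int) (h : arr ≠ []) :
    solution_memory_search_alt arr = max (g1 arr 0 (arr.length - 1)) (g2 arr 0 (arr.length - 1)) := by
  have hn : 0 < arr.length := List.length_pos_iff.mpr h
  have harr : arr = (List.range (arr.length - 1 + 1)).map (fun s => g1 arr s 0) := by
    apply List.ext_getElem
    · simp; omega
    · intro i h1 h2
      simp only [List.getElem_map, List.getElem_range, g1]
      rw [List.getD_eq_getElem _ _ h1]
  have hrep : List.replicate arr.length (0 : Int) =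
      (List.range (arr.length - 1 + 1)).map (fun s => g2 arr s 0) := by
    apply List.ext_getElem
    · simp; omega
    · intro i h1 h2
      simp [g2]
  have key := pvLoop_correct arr (arr.length - 1) 0 arr.length (by omega) (by omega)
  rw [List.drop_zero, ← harr, ← hrep] at key
  simp only [solution_memory_search_alt, if_neg h]
  rw [key]

-- ===== VERDICT (by name: the statement is the Claim_ definition above) =====
theorem solution_memory_search_spec : Claim_equal_solution_memory_search := by
  intro arr _
  unfold Spec_solution_memory_search
  by_cases h : arr = []
  · subst h; rfl
  · rw [portA_eq_g arr h, portB_eq_g arr h]
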